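-- pv_equiv track=rewrite | github.com/tbattista/simplegym-2025-v2 | backend/scripts/extract_exercise_data.py | find_matching_row
-- ===== SOURCE A (Python) =====
-- def normalize_name(name: str) -> str:
--     """Normalize exercise name for comparison"""
--     if not name:
--         return ""
--     return name.lower().strip()
--
-- def find_matching_row(exercise_name: str, excel_data: list, name_col_idx: int) -> tuple:
--     """
--     Find a matching row in Excel data for the given exercise name.
--     Returns (row_data, match_type) if found, (None, None) otherwise.
--     """
--     normalized_search = normalize_name(exercise_name)
--     if not normalized_search:
--         return None, None
--
--     # First pass: exact match
--     for row in excel_data: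
--         excel_name = row.get(name_col_idx, '')
--         if excel_name and normalize_name(str(excel_name)) == normalized_search:
--             return row, "exact"
--
--     # Second pass: partial match (search term in excel name)
--     for row in excel_data:
--         excel_name = row.get(name_col_idx, '')
--         if excel_name:
--             normalized_excel = normalize_name(str(excel_name))
--             if normalized_search in normalized_excel:
--                 return row, "partial"
--
--     # Third pass: partial match (excel name in search term)
--     for row in excel_data:
--         excel_name = row.get(name_col_idx, '')
--         if excel_name:
--             normalized_excel = normalize_name(str(excel_name))
--             if len(normalized_excel) > 5 and normalized_excel in normalized_search:
--                 return row, "contains"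
--
--     return None, None
-- ===== SOURCE B (Python) =====
-- def normalize_name(name: str) -> str:
--     """Normalize exercise name for comparison"""
--     if not name:
--         return ""
--     return name.lower().strip()
--
-- def find_matching_row(exercise_name: str, excel_data: list, name_col_idx: int) -> tuple:
--     """Single pass: return on exact immediately; remember the first partial and
--     the first contains candidate and pick them by priority after the loop."""
--     normalized_search = normalize_name(exercise_name)
--     if not normalized_search:
--         return None, None
--     partial = None
--     contains = None
--     for row in excel_data:
--         excel_name = row.get(name_col_idx, '')
--         if not excel_name:
--             continue
--         normalized_excel = normalize_name(str(excel_name))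
--         if normalized_excel == normalized_search:
--             return row, "exact"
--         if partial is None and normalized_search in normalized_excel:
--             partial = row
--         if contains is None and len(normalized_excel) > 5 and normalized_excel in normalized_search:
--             contains = row
--     if partial is not None:
--         return partial, "partial"
--     if contains is not None:
--         return contains, "contains"
--     return None, None
-- ===== Notes on version B (the rewrite author's own statement) =====
-- stated objective: simpler
-- what changed: Replaces A's three sequential scans of excel_data (exact, then partial, then contains) by one loop that normalizes each name once, returns immediately on an exact match, and records the first partial and first contains candidates to choose by priority after the loop.
import Mathlib
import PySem

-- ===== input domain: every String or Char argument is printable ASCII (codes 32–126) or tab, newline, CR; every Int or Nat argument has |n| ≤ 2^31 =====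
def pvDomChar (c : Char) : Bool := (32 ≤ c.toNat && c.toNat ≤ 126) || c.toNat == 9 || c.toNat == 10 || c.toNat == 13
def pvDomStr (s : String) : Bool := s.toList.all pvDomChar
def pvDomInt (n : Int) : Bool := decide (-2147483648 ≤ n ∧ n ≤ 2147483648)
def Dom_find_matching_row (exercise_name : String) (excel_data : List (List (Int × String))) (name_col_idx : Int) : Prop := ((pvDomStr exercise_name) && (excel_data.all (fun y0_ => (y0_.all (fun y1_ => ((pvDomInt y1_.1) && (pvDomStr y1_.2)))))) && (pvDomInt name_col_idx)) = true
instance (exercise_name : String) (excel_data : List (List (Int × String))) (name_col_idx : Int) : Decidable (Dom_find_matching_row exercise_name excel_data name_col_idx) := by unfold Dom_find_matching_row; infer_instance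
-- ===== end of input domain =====

-- B replaces A's three scans by one pass that normalizes each name once (objective: simpler).

-- shared helpers (the Python module's normalize_name and dict row.get)
def pvNormalize (name : String) : String :=
  if name = "" then "" else PySem.Str.strip (PySem.Str.lower name)

def pvRowGet (row : List (Int × String)) (k : Int) : String :=
  (PySem.Dict.mk row).getD k ""

-- ===== PORT A =====
def pvPassExact (search : String) (idx : Int) : List (List (Int × String)) → Option (List (Int × String))
  | [] => none
  | r :: rs =>
    let en := pvRowGet r idx
    if en ≠ "" ∧ pvNormalize en = search then some r else pvPassExact search idx rs

def pvPassPartial (search : String) (idx : Int) : List (List (Int × String)) → Option (List (Int × String))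
  | [] => none
  | r :: rs =>
    let en := pvRowGet r idx
    if en ≠ "" ∧ PySem.Str.isIn search (pvNormalize en) then some r else pvPassPartial search idx rs

def pvPassContains (search : String) (idx : Int) : List (List (Int × String)) → Option (List (Int × String))
  | [] => none
  | r :: rs =>
    let en := pvRowGet r idx
    if en ≠ "" ∧ PySem.Str.len (pvNormalize en) > 5 ∧ PySem.Str.isIn (pvNormalize en) search then some r
    else pvPassContains search idx rs

def find_matching_row (exercise_name : String) (excel_data : List (List (Int × String))) (name_col_idx : Int) : (Option (List (Int × String))) × Option String :=
  let ns := pvNormalize exercise_name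
  if ns = "" then (none, none)
  else
    match pvPassExact ns name_col_idx excel_data with
    | some r => (some r, some "exact")
    | none =>
      match pvPassPartial ns name_col_idx excel_data with
      | some r => (some r, some "partial")
      | none =>
        match pvPassContains ns name_col_idx excel_data with
        | some r => (some r, some "contains")
        | none => (none, none)

-- ===== PORT B =====
def pvScan (search : String) (idx : Int) :
    List (List (Int × String)) → Option (List (Int × String)) → Option (List (Int × String)) →
    (Option (List (Int × String))) × Option String
  | [], p, c =>
    match p with
    | some r => (some r, some "partial")
    | none =>
      match c with
      | some r => (some r, some "contains")
      | none => (none, none)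
  | r :: rs, p, c =>
    let en := pvRowGet r idx
    if en = "" then pvScan search idx rs p c
    else
      let ne := pvNormalize en
      if ne = search then (some r, some "exact")
      else
        let p' := if p.isNone ∧ PySem.Str.isIn search ne then some r else p
        let c' := if c.isNone ∧ PySem.Str.len ne > 5 ∧ PySem.Str.isIn ne search then some r else c
        pvScan search idx rs p' c'

def find_matching_row_alt (exercise_name : String) (excel_data : List (List (Int × String))) (name_col_idx : Int) : (Option (List (Int × String))) × Option String :=
  let ns := pvNormalize exercise_name
  if ns = "" then (none, none)
  else pvScan ns name_col_idx excel_data none none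

-- ===== PRECONDITION & SPEC =====
def Spec_find_matching_row (exercise_name : String) (excel_data : List (List (Int × String))) (name_col_idx : Int) (out : (Option (List (Int × String))) × Option String) : Prop := out = find_matching_row_alt exercise_name excel_data name_col_idx
instance (exercise_name : String) (excel_data : List (List (Int × String))) (name_col_idx : Int) (out : (Option (List (Int × String))) × Option String) : Decidable (Spec_find_matching_row exercise_name excel_data name_col_idx out) := by unfold Spec_find_matching_row; infer_instance

-- ===== CLAIM (what is proved, stated in full; the proofs are below) =====
def Claim_equal_find_matching_row : Prop := ∀ (exercise_name : String) (excel_data : List (List (Int × String))) (name_col_idx : Int), Dom_find_matching_row exercise_name excel_data name_col_idx → Spec_find_matching_row exercise_name excel_data name_col_idx (find_matching_row exercise_name excel_data name_col_idx)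

-- ===== LEMMAS AND PROOFS =====
def pvOr {α : Type} : Option α → Option α → Option α
  | some x, _ => some x
  | none, b => b

theorem pvScan_eq (search : String) (idx : Int) (rows : List (List (Int × String)))
    (p c : Option (List (Int × String))) :
    pvScan search idx rows p c =
      match pvPassExact search idx rows with
      | some r => (some r, some "exact")
      | none =>
        match pvOr p (pvPassPartial search idx rows) with
        | some r => (some r, some "partial")
        | none =>
          match pvOr c (pvPassContains search idx rows) with
          | some r => (some r, some "contains")
          | none => (none, none) := by
  induction rows generalizing p c with
  | nil =>
    cases p <;> cases c <;> simp [pvScan, pvPassExact, pvPassPartial, pvPassContains, pvOr]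
  | cons r rs ih =>
    by_cases hen : pvRowGet r idx = ""
    · simp [pvScan, pvPassExact, pvPassPartial, pvPassContains, hen, ih]
    · by_cases hex : pvNormalize (pvRowGet r idx) = search
      · simp [pvScan, pvPassExact, hen, hex]
      · simp only [pvScan, pvPassExact, pvPassPartial, pvPassContains, hen, hex, ne_eq,
          not_false_eq_true, true_and, if_false]
        rw [ih]
        cases p <;> cases c <;> split_ifs <;> simp_all [pvOr]

-- ===== VERDICT (by name: the statement is the Claim_ definition above) =====
theorem find_matching_row_spec : Claim_equal_find_matching_row := by
  intro en data idx _
  unfold Spec_find_matching_row find_matching_row find_matching_row_alt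
  by_cases hns : pvNormalize en = ""
  · simp [hns]
  · simp only [hns, if_false]
    rw [pvScan_eq]
    simp [pvOr]
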